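-- pv_equiv track=rewrite | github.com/lautaroboninom/sistema_de_ventas_las_chulas | api/service/trazabilidad.py | _pick_date_cols
-- ===== SOURCE A (Python) =====
-- DATE_HINTS_WEIGHT = [
--     # Preferido (según tu estructura): "Comp. - F. Emisión"
--     ("comp_f_emision", 120),
--     ("fecha_emision", 110),
--     ("fecha_venta", 100),
--     ("fecha_factura", 90),
--     ("fecha_remito", 80),
--     ("fecha", 50),
-- ]
--
-- def _pick_date_cols(headers: list) -> list:
--     cols = []
--     for i, h in enumerate(headers):
--         for key, weight in DATE_HINTS_WEIGHT:
--             if key in h: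
--                 cols.append((i, weight))
--                 break
--     # sort by weight desc
--     cols.sort(key=lambda x: x[1], reverse=True)
--     return [i for i, _w in cols]
-- ===== SOURCE B (Python) =====
-- DATE_HINTS_WEIGHT = [
--     ("comp_f_emision", 120),
--     ("fecha_emision", 110),
--     ("fecha_venta", 100),
--     ("fecha_factura", 90),
--     ("fecha_remito", 80),
--     ("fecha", 50),
-- ]
--
--
-- def _best_weight(h):
--     for key, weight in DATE_HINTS_WEIGHT:
--         if key in h:
--             return weight
--     return None
--
--
-- def _pick_date_cols(headers: list) -> list:
--     # Bucket by weight: one pass per fixed weight, descending; no sort needed.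
--     return [i
--             for w in (120, 110, 100, 90, 80, 50)
--             for i, h in enumerate(headers)
--             if _best_weight(h) == w]
-- ===== Notes on version B (the rewrite author's own statement) =====
-- stated objective: alternative
-- what changed: B drops A's build-pairs-then-stable-sort: it buckets by iterating the fixed weight values in descending order and collecting, per weight, the indices of headers whose best hint matches that weight, so no sort and no intermediate (index, weight) pairs.
import Mathlib
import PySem

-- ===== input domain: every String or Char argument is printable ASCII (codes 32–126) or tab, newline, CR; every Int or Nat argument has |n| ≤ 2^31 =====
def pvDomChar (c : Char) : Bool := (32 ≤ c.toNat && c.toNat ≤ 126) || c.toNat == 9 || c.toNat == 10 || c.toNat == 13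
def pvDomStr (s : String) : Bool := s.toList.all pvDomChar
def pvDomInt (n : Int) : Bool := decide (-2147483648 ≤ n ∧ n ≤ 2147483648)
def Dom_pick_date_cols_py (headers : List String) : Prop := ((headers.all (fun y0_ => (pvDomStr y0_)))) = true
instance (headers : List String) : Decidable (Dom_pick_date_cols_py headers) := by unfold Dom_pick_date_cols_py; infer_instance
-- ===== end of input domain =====

-- B replaces A's build-then-stable-sort by per-weight bucketing passes over the fixed
-- descending weight list (alternative decomposition, same results).

-- ===== PORT A =====
-- module constant DATE_HINTS_WEIGHT (shared by both Pythons)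
def dateHintsWeight : List (String × Int) :=
  [("comp_f_emision", 120), ("fecha_emision", 110), ("fecha_venta", 100),
   ("fecha_factura", 90), ("fecha_remito", 80), ("fecha", 50)]

-- A's inner 'for key, weight in DATE_HINTS_WEIGHT: if key in h: …; break' — first match wins
-- (also B's helper _best_weight, which is the same scan)
def firstHitWeight (h : String) : List (String × Int) → Option Int
  | [] => none
  | kw :: rest => if PySem.Str.isIn kw.1 h then some kw.2 else firstHitWeight h rest

def pick_date_cols_py (headers : List String) : List Int :=
  (PySem.List.sorted
    ((PySem.List.enumerate headers).foldl
      (fun cols ih =>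
        match firstHitWeight ih.2 dateHintsWeight with
        | some w => cols ++ [(ih.1, w)]
        | none => cols) [])
    (fun x => x.2) true).map (fun x => x.1)

-- ===== PORT B =====
def weightsDesc : List Int := [120, 110, 100, 90, 80, 50]

def pick_date_cols_py_alt (headers : List String) : List Int :=
  weightsDesc.flatMap (fun w =>
    (PySem.List.enumerate headers).filterMap (fun ih =>
      if firstHitWeight ih.2 dateHintsWeight == some w then some ih.1 else none))

-- ===== PRECONDITION & SPEC =====
def Spec_pick_date_cols_py (headers : List String) (out : List Int) : Prop := out = pick_date_cols_py_alt headers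
instance (headers : List String) (out : List Int) : Decidable (Spec_pick_date_cols_py headers out) := by unfold Spec_pick_date_cols_py; infer_instance

-- ===== CLAIM (what is proved, stated in full; the proofs are below) =====
def Claim_equal_pick_date_cols_py : Prop := ∀ (headers : List String), Dom_pick_date_cols_py headers → Spec_pick_date_cols_py headers (pick_date_cols_py headers)

-- ===== LEMMAS AND PROOFS =====

-- A's append-or-skip fold over the enumerated headers is a filterMap
theorem foldl_A :
    ∀ (l : List (Int × String)) (init : List (Int × Int)),
      l.foldl (fun cols ih =>
          match firstHitWeight ih.2 dateHintsWeight with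
          | some w => cols ++ [(ih.1, w)]
          | none => cols) init
        = init ++ l.filterMap (fun ih => (firstHitWeight ih.2 dateHintsWeight).map (fun w => (ih.1, w))) := by
  intro l
  induction l with
  | nil => simp
  | cons x t ih =>
      intro init
      cases h : firstHitWeight x.2 dateHintsWeight <;> simp [List.foldl_cons, h, ih]

theorem insertBy_append_of_not {α : Type} (before : α → α → Bool) (x : α) (A B : List α)
    (h : ∀ y ∈ A, before x y = false) :
    PySem.List.insertBy before x (A ++ B) = A ++ PySem.List.insertBy before x B := by
  induction A with
  | nil => simp
  | cons a t ih =>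
      simp only [List.cons_append, PySem.List.insertBy, h a (by simp)]
      simp only [Bool.false_eq_true, if_false, List.cons.injEq, true_and]
      exact ih (fun y hy => h y (by simp [hy]))

theorem insertBy_of_forall_before {α : Type} (before : α → α → Bool) (x : α) (B : List α)
    (h : ∀ y ∈ B, before x y = true) :
    PySem.List.insertBy before x B = x :: B := by
  cases B with
  | nil => rfl
  | cons b t => simp [PySem.List.insertBy, h b (by simp)]

theorem flatMap_congr_mem {α β : Type} (l : List α) (f g : α → List β)
    (h : ∀ x ∈ l, f x = g x) : l.flatMap f = l.flatMap g := by
  induction l with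
  | nil => rfl
  | cons a t ih =>
      simp only [List.flatMap_cons, h a (by simp)]
      rw [ih (fun x hx => h x (by simp [hx]))]

-- inserting c (descending by snd) into descending-weight buckets appends it to its bucket
theorem insert_buckets (ws : List Int) (cols : List (Int × Int)) (c : Int × Int)
    (hp : ws.Pairwise (· > ·)) (hc : c.2 ∈ ws) :
    PySem.List.insertBy (fun a b => decide (b.2 < a.2)) c
        (ws.flatMap (fun w => cols.filter (fun x => decide (x.2 = w))))
      = ws.flatMap (fun w => (cols ++ [c]).filter (fun x => decide (x.2 = w))) := by
  induction ws with
  | nil => cases hc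
  | cons w ws' ih =>
      have hgt : ∀ v ∈ ws', w > v := (List.pairwise_cons.mp hp).1
      have hp' : ws'.Pairwise (· > ·) := (List.pairwise_cons.mp hp).2
      by_cases hcw : c.2 = w
      · -- c lands at the end of the w-bucket
        have hrest : ∀ y ∈ ws'.flatMap (fun w => cols.filter (fun x => decide (x.2 = w))),
            (fun a b => decide (b.2 < a.2)) c y = true := by
          intro y hy
          obtain ⟨v, hv, hyv⟩ := List.mem_flatMap.mp hy
          have hy2 : y.2 = v := by simpa using (List.mem_filter.mp hyv).2
          have := hgt v hv
          simp only [decide_eq_true_eq]; omega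
        have hA : ∀ y ∈ cols.filter (fun x => decide (x.2 = w)),
            (fun a b => decide (b.2 < a.2)) c y = false := by
          intro y hy
          have hy2 : y.2 = w := by simpa using (List.mem_filter.mp hy).2
          simp only [decide_eq_false_iff_not]; omega
        rw [List.flatMap_cons, insertBy_append_of_not _ _ _ _ hA,
            insertBy_of_forall_before _ _ _ hrest, List.flatMap_cons,
            List.filter_append,
            flatMap_congr_mem ws' (fun v => (cols ++ [c]).filter (fun x => decide (x.2 = v)))
              (fun v => cols.filter (fun x => decide (x.2 = v)))
              (by
                intro v hv
                have := hgt v hv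
                dsimp only
                rw [List.filter_append]
                have : (List.filter (fun x => decide (x.2 = v)) [c]) = [] := by
                  simp; omega
                simp [this])]
        simp [hcw]
      · have hc' : c.2 ∈ ws' := by
          rcases List.mem_cons.mp hc with h | h
          · exact absurd h hcw
          · exact h
        have hgtc : w > c.2 := hgt _ hc'
        have hA : ∀ y ∈ cols.filter (fun x => decide (x.2 = w)),
            (fun a b => decide (b.2 < a.2)) c y = false := by
          intro y hy
          have hy2 : y.2 = w := by simpa using (List.mem_filter.mp hy).2
          simp only [decide_eq_false_iff_not]; omega
        rw [List.flatMap_cons, insertBy_append_of_not _ _ _ _ hA, ih hp' hc',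
            List.flatMap_cons, List.filter_append]
        have : (List.filter (fun x => decide (x.2 = w)) [c]) = [] := by simp; omega
        simp [this]

theorem sorted_buckets (ws : List Int) (hp : ws.Pairwise (· > ·)) :
    ∀ cols : List (Int × Int), (∀ x ∈ cols, x.2 ∈ ws) →
      PySem.List.sorted cols (fun x => x.2) true
        = ws.flatMap (fun w => cols.filter (fun x => decide (x.2 = w))) := by
  intro cols
  induction cols using List.reverseRecOn with
  | nil => intro _; simp [PySem.List.sorted]
  | append_singleton cols c ih =>
      intro hmem
      rw [PySem.List.sorted_rev_eq_foldl_insertBy, List.foldl_append, List.foldl_cons,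
          List.foldl_nil, ← PySem.List.sorted_rev_eq_foldl_insertBy,
          ih (fun x hx => hmem x (by simp [hx]))]
      exact insert_buckets ws cols c hp (hmem c (by simp))

theorem map_fst_filter_bucket (w : Int) (l : List (Int × String)) :
    ((l.filterMap (fun ih => (firstHitWeight ih.2 dateHintsWeight).map (fun v => (ih.1, v)))).filter
        (fun x => decide (x.2 = w))).map (fun x => x.1)
      = l.filterMap (fun ih => if firstHitWeight ih.2 dateHintsWeight == some w then some ih.1 else none) := by
  induction l with
  | nil => rfl
  | cons a t ih =>
      cases h : firstHitWeight a.2 dateHintsWeight with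
      | none => simp [h, ih]
      | some v =>
          by_cases hv : v = w <;> simp [h, hv, ih]

theorem firstHit_mem (h : String) :
    ∀ (hints : List (String × Int)) (w : Int),
      firstHitWeight h hints = some w → w ∈ hints.map (fun kw => kw.2) := by
  intro hints
  induction hints with
  | nil => intro w hw; cases hw
  | cons kw t ih =>
      intro w hw
      simp only [firstHitWeight] at hw
      by_cases hk : PySem.Str.isIn kw.1 h = true
      · rw [if_pos hk] at hw; cases hw; simp
      · rw [if_neg hk] at hw
        exact List.mem_cons_of_mem _ (ih w hw)

-- ===== VERDICT (by name: the statement is the Claim_ definition above) =====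
theorem pick_date_cols_py_spec : Claim_equal_pick_date_cols_py := by
  intro headers _
  unfold Spec_pick_date_cols_py pick_date_cols_py pick_date_cols_py_alt
  have hmem : ∀ x ∈ (PySem.List.enumerate headers).filterMap
      (fun ih => (firstHitWeight ih.2 dateHintsWeight).map (fun w => (ih.1, w))),
      x.2 ∈ weightsDesc := by
    intro x hx
    obtain ⟨ih, -, hgx⟩ := List.mem_filterMap.mp hx
    cases h : firstHitWeight ih.2 dateHintsWeight with
    | none => rw [h] at hgx; cases hgx
    | some w =>
        rw [h] at hgx
        have hx2 : x.2 = w := by cases hgx; rfl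
        have := firstHit_mem ih.2 dateHintsWeight w h
        rw [hx2]
        simpa [dateHintsWeight, weightsDesc] using this
  rw [foldl_A, List.nil_append,
      sorted_buckets weightsDesc (by decide) _ hmem, List.map_flatMap]
  exact flatMap_congr_mem _ _ _
    (fun w _ => map_fst_filter_bucket w (PySem.List.enumerate headers))
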